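-- pv_equiv track=rewrite | github.com/nazirite96/pythonStudy | check1/level1_2.py | solution
-- ===== SOURCE A (Python) =====
-- def solution(n, m, section):
--     answer = 0
--     while len(section) != 0:
--         start = section[0]
--         end = start + m - 1
--         while start <= section[0] <= end:
--             section.pop(0)
--             if len(section) == 0:
--                 break
--         answer += 1
--     return answer
-- ===== SOURCE B (Python) =====
-- def solution(n, m, section):
--     answer = 0
--     bounds = None
--     for x in section:
--         if bounds is None or x < bounds[0] or x > bounds[1]:
--             bounds = (x, x + m - 1)
--             answer += 1
--     return answer
-- ===== Notes on version B (the rewrite author's own statement) =====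
-- stated objective: faster
-- what changed: Replaced the nested while loops with repeated pop(0) (quadratic, and destructive on the list) by a single non-mutating pass that opens a new segment whenever the current element falls outside the active segment's bounds.
import Mathlib
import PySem

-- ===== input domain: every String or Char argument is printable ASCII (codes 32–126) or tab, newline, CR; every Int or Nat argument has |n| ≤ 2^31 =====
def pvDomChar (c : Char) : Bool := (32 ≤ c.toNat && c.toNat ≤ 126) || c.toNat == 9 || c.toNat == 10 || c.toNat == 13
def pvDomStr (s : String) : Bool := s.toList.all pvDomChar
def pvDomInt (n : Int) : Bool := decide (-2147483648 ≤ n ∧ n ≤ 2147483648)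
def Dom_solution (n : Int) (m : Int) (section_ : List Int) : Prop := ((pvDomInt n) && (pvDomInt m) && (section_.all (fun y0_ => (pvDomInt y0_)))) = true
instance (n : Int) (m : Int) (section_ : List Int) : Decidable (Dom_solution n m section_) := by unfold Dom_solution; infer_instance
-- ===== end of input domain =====

-- B replaces A's nested pop(0) loops by one non-mutating pass tracking the active
-- segment's bounds (faster; note A empties the caller's list in place, B does not
-- mutate it — the equivalence proved here is about the return value only).

-- ===== PORT A =====
-- inner while loop: pop elements while start ≤ head ≤ end (break when empty)
def solutionPop (start e : Int) : List Int → List Int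
  | [] => []
  | x :: rest => if start ≤ x ∧ x ≤ e then solutionPop start e rest else x :: rest

-- outer while loop; fuel only makes the recursion structural (with 1 ≤ m each
-- iteration pops at least the head, so fuel = section_.length suffices)
def solutionLoop (m : Int) (fuel : Nat) (sec : List Int) (answer : Int) : Int :=
  match fuel with
  | 0 => answer
  | fuel + 1 =>
    match sec with
    | [] => answer
    | x :: rest => solutionLoop m fuel (solutionPop x (x + m - 1) (x :: rest)) (answer + 1)

def solution (n : Int) (m : Int) (section_ : List Int) : Int :=
  solutionLoop m section_.length section_ 0

-- ===== PORT B =====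
-- one pass: state = (answer, current segment bounds or none)
def solutionStep (m : Int) (st : Int × Option (Int × Int)) (x : Int) : Int × Option (Int × Int) :=
  match st with
  | (ans, none) => (ans + 1, some (x, x + m - 1))
  | (ans, some (lo, hi)) =>
    if x < lo ∨ x > hi then (ans + 1, some (x, x + m - 1)) else (ans, some (lo, hi))

def solution_alt (n : Int) (m : Int) (section_ : List Int) : Int :=
  (section_.foldl (solutionStep m) (0, none)).1

-- ===== PRECONDITION & SPEC =====
-- Pre_ excludes m ≤ 0 with a nonempty list: there A's inner while never pops, so the
-- outer while loop runs forever (A diverges; it returns on exactly the inputs in Pre_).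
def Pre_solution (n : Int) (m : Int) (section_ : List Int) : Prop := section_ = [] ∨ 1 ≤ m
instance (n : Int) (m : Int) (section_ : List Int) : Decidable (Pre_solution n m section_) := by unfold Pre_solution; infer_instance

def pvWitness_solution : Int × Int × List Int := (5, 2, [1, 2, 5, 6, 9])

def Spec_solution (n : Int) (m : Int) (section_ : List Int) (out : Int) : Prop := out = solution_alt n m section_
instance (n : Int) (m : Int) (section_ : List Int) (out : Int) : Decidable (Spec_solution n m section_ out) := by unfold Spec_solution; infer_instance

-- ===== CLAIM (what is proved, stated in full; the proofs are below) =====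
def Claim_equal_solution : Prop := ∀ (n : Int) (m : Int) (section_ : List Int), Dom_solution n m section_ → Pre_solution n m section_ → Spec_solution n m section_ (solution n m section_)

-- ===== LEMMAS AND PROOFS =====

theorem solutionPop_length_le (start e : Int) (l : List Int) :
    (solutionPop start e l).length ≤ l.length := by
  induction l with
  | nil => simp [solutionPop]
  | cons x rest ih =>
    simp only [solutionPop]
    split
    · exact Nat.le_succ_of_le ih
    · simp

-- skipping the in-range prefix does not change the answer component of B's fold
theorem foldl_solutionStep_pop (m lo hi ans : Int) (l : List Int) :
    (l.foldl (solutionStep m) (ans, some (lo, hi))).1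
      = ((solutionPop lo hi l).foldl (solutionStep m) (ans, none)).1 := by
  induction l generalizing ans with
  | nil => simp [solutionPop]
  | cons x rest ih =>
    by_cases h : lo ≤ x ∧ x ≤ hi
    · have hc : ¬(x < lo ∨ x > hi) := by omega
      have hstep : solutionStep m (ans, some (lo, hi)) x = (ans, some (lo, hi)) := by
        simp [solutionStep, hc]
      simp only [List.foldl_cons, hstep, solutionPop, if_pos h]
      exact ih ans
    · have hc : x < lo ∨ x > hi := by omega
      have hstep : solutionStep m (ans, some (lo, hi)) x = (ans + 1, some (x, x + m - 1)) := by
        simp [solutionStep, hc]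
      simp only [List.foldl_cons, hstep, solutionPop, if_neg h]
      simp [solutionStep]

theorem solutionLoop_eq_foldl (m : Int) (hm : 1 ≤ m) :
    ∀ (fuel : Nat) (sec : List Int) (ans : Int), sec.length ≤ fuel →
      solutionLoop m fuel sec ans = (sec.foldl (solutionStep m) (ans, none)).1 := by
  intro fuel
  induction fuel with
  | zero =>
    intro sec ans hlen
    have : sec = [] := List.eq_nil_of_length_eq_zero (Nat.le_zero.mp hlen)
    simp [this, solutionLoop]
  | succ fuel ih =>
    intro sec ans hlen
    cases sec with
    | nil => simp [solutionLoop]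
    | cons x rest =>
      have hx : x ≤ x ∧ x ≤ x + m - 1 := ⟨le_refl x, by omega⟩
      have hpop : solutionPop x (x + m - 1) (x :: rest) = solutionPop x (x + m - 1) rest := by
        simp only [solutionPop, if_pos hx]
      have hlen' : (solutionPop x (x + m - 1) (x :: rest)).length ≤ fuel := by
        rw [hpop]
        exact le_trans (solutionPop_length_le _ _ _) (by simpa using Nat.lt_succ_iff.mp hlen)
      calc solutionLoop m (fuel + 1) (x :: rest) ans
          = solutionLoop m fuel (solutionPop x (x + m - 1) (x :: rest)) (ans + 1) := by
            simp [solutionLoop]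
        _ = ((solutionPop x (x + m - 1) (x :: rest)).foldl (solutionStep m) (ans + 1, none)).1 :=
            ih _ _ hlen'
        _ = ((solutionPop x (x + m - 1) rest).foldl (solutionStep m) (ans + 1, none)).1 := by
            rw [hpop]
        _ = (rest.foldl (solutionStep m) (ans + 1, some (x, x + m - 1))).1 :=
            (foldl_solutionStep_pop m x (x + m - 1) (ans + 1) rest).symm
        _ = ((x :: rest).foldl (solutionStep m) (ans, none)).1 := by
            simp [solutionStep]

-- ===== VERDICT (by name: the statement is the Claim_ definition above) =====
theorem solution_spec : Claim_equal_solution := by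
  intro n m section_ _ hpre
  unfold Spec_solution solution solution_alt
  rcases hpre with h | hm
  · simp [h, solutionLoop]
  · exact solutionLoop_eq_foldl m hm section_.length section_ 0 le_rfl
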